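-- pv_equiv track=rewrite | github.com/Mo0dy/dice-web | webbridge.py | _truncate_to_complete_program
-- ===== SOURCE A (Python) =====
-- def _truncate_to_complete_program(source_prefix):
--     candidates = [source_prefix]
--     seen = {source_prefix}
--     current = source_prefix
--     while current:
--         boundary = max(current.rfind("\n"), current.rfind(";"))
--         if boundary < 0:
--             break
--         current = current[:boundary]
--         if current in seen:
--             break
--         candidates.append(current)
--         seen.add(current)
--     candidates.append("")
--     return candidates
-- ===== SOURCE B (Python) =====
-- def _truncate_to_complete_program(source_prefix):
--     cut_points = [i for i, ch in enumerate(source_prefix) if ch == "\n" or ch == ";"]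
--     result = [source_prefix]
--     for i in reversed(cut_points):
--         result.append(source_prefix[:i])
--     result.append("")
--     return result
-- ===== Notes on version B (the rewrite author's own statement) =====
-- stated objective: simpler
-- what changed: Replaces A's while-loop that repeatedly rfind-scans the shrinking current string and maintains a seen-set (provably dead, since the prefixes strictly shrink) with a single forward scan collecting all newline/semicolon indices, then emits the prefixes in descending index order followed by the final empty candidate.
import Mathlib
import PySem

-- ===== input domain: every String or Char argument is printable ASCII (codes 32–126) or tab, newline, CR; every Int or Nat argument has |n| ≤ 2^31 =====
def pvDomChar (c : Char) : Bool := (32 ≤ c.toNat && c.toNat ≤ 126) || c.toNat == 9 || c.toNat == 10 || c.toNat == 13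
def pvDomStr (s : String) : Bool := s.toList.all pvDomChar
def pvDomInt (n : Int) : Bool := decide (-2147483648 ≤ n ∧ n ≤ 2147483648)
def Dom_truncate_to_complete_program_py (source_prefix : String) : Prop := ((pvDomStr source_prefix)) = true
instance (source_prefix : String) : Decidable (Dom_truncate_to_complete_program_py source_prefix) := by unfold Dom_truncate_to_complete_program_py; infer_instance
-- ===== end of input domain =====

-- B replaces A's repeated-rfind while-loop (and its dead 'seen' set) with one forward scan that
-- collects separator indices, then emits the prefixes in descending index order (objective: simpler).

-- ===== PORT A =====
-- A's while-loop; the fuel only makes the recursion structural (each iteration strictly shortens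
-- current, so fuel = length + 1 is never exhausted — established in the proof of loop_eq below)
def pyAloop (fuel : Nat) (candidates : List String) (seen : PySem.Set String) (current : String) :
    List String :=
  match fuel with
  | 0 => candidates
  | Nat.succ fuel =>
    if current = "" then candidates
    else
      let boundary : Int := max (PySem.Str.rfind current "\n") (PySem.Str.rfind current ";")
      if boundary < 0 then candidates
      else
        let current' := PySem.Str.slice current none (some boundary)
        if PySem.Set.contains seen current' then candidates
        else pyAloop fuel (candidates ++ [current']) (PySem.Set.add seen current') current'

def truncate_to_complete_program_py (source_prefix : String) : List String :=
  pyAloop (source_prefix.length + 1) [source_prefix] (PySem.Set.ofList [source_prefix])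
    source_prefix ++ [""]

-- ===== PORT B =====
def truncate_to_complete_program_py_alt (source_prefix : String) : List String :=
  let cut_points : List Int :=
    ((PySem.List.enumerate source_prefix.toList 0).filter
      (fun p => p.2 == '\n' || p.2 == ';')).map (·.1)
  (source_prefix ::
    cut_points.reverse.map (fun i => PySem.Str.slice source_prefix none (some i))) ++ [""]

-- ===== PRECONDITION & SPEC =====
def Spec_truncate_to_complete_program_py (source_prefix : String) (out : List String) : Prop := out = truncate_to_complete_program_py_alt source_prefix
instance (source_prefix : String) (out : List String) : Decidable (Spec_truncate_to_complete_program_py source_prefix out) := by unfold Spec_truncate_to_complete_program_py; infer_instance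

-- ===== CLAIM (what is proved, stated in full; the proofs are below) =====
def Claim_equal_truncate_to_complete_program_py : Prop := ∀ (source_prefix : String), Dom_truncate_to_complete_program_py source_prefix → Spec_truncate_to_complete_program_py source_prefix (truncate_to_complete_program_py source_prefix)

-- ===== LEMMAS AND PROOFS =====

def sepB (c : Char) : Bool := c == '\n' || c == ';'

def sepAt (s : List Char) (i : Nat) : Prop := s[i]? = some '\n' ∨ s[i]? = some ';'

def cutsN (cs : List Char) (k : Nat) : List Nat :=
  (List.range k).filter (fun i => sepB (cs.getD i ' '))

lemma str_ext {a b : String} (h : a.toList = b.toList) : a = b := by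
  have := congrArg String.ofList h; simpa using this

lemma one_pref (c : Char) (l : List Char) : [c].isPrefixOf l = true ↔ l[0]? = some c := by
  cases l with
  | nil => simp [List.isPrefixOf]
  | cons x xs =>
    simp only [List.isPrefixOf, List.getElem?_cons_zero, Option.some.injEq, Bool.and_eq_true, and_true, beq_iff_eq]
    exact eq_comm

lemma go_zero (s : List Char) (c : Char) :
    PySem.Chars.rfind.go s [c] 0 = if s[0]? = some c then 0 else -1 := by
  rw [show PySem.Chars.rfind.go s [c] 0 = if [c].isPrefixOf s = true then 0 else -1 from rfl]
  by_cases h : s[0]? = some c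
  · rw [if_pos ((one_pref c s).mpr h), if_pos h]
  · rw [if_neg (fun hp => h ((one_pref c s).mp hp)), if_neg h]

lemma go_succ (s : List Char) (c : Char) (j : Nat) :
    PySem.Chars.rfind.go s [c] (j+1)
      = if s[j+1]? = some c then ((j+1 : Nat) : Int) else PySem.Chars.rfind.go s [c] j := by
  rw [show PySem.Chars.rfind.go s [c] (j+1)
      = if [c].isPrefixOf (s.drop (j+1)) = true then ((j+1 : Nat) : Int)
        else PySem.Chars.rfind.go s [c] j from rfl]
  have hd : (s.drop (j+1))[0]? = s[j+1]? := by simp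
  by_cases h : s[j+1]? = some c
  · rw [if_pos ((one_pref c _).mpr (hd ▸ h)), if_pos h]
  · rw [if_neg (fun hp => h (hd ▸ (one_pref c _).mp hp)), if_neg h]

lemma go_le (s : List Char) (c : Char) (j : Nat) : PySem.Chars.rfind.go s [c] j ≤ (j : Int) := by
  induction j with
  | zero => rw [go_zero]; split <;> omega
  | succ j ih => rw [go_succ]; split <;> omega

lemma maxgo_cases (s : List Char) (j : Nat) :
    (max (PySem.Chars.rfind.go s ['\n'] j) (PySem.Chars.rfind.go s [';'] j) = -1
        ∧ ∀ i ≤ j, ¬ sepAt s i)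
    ∨ ∃ b, b ≤ j ∧ sepAt s b ∧ (∀ i, b < i → i ≤ j → ¬ sepAt s i)
        ∧ max (PySem.Chars.rfind.go s ['\n'] j) (PySem.Chars.rfind.go s [';'] j) = (b : Int) := by
  induction j with
  | zero =>
    by_cases h : sepAt s 0
    · right
      refine ⟨0, le_refl _, h, fun i hi hi2 => by omega, ?_⟩
      rcases h with h | h
      · rw [go_zero, go_zero, if_pos h, if_neg (by rw [h]; simp)]; rfl
      · rw [go_zero, go_zero, if_neg (by rw [h]; simp), if_pos h]; rfl
    · left
      rw [sepAt, not_or] at h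
      refine ⟨?_, fun i hi => by interval_cases i; rw [sepAt, not_or]; exact h⟩
      rw [go_zero, go_zero, if_neg h.1, if_neg h.2]; rfl
  | succ j ih =>
    by_cases h : sepAt s (j+1)
    · right
      refine ⟨j+1, le_refl _, h, fun i hi hi2 => by omega, ?_⟩
      have l1 := go_le s '\n' j
      have l2 := go_le s ';' j
      rcases h with h | h
      · rw [go_succ, go_succ, if_pos h, if_neg (by rw [h]; simp)]; push_cast; omega
      · rw [go_succ, go_succ, if_neg (by rw [h]; simp), if_pos h]; push_cast; omega
    · have h' := h; rw [sepAt, not_or] at h'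
      rw [go_succ, go_succ, if_neg h'.1, if_neg h'.2]
      rcases ih with ⟨hm, hall⟩ | ⟨b, hb, hsep, hint, hm⟩
      · left
        exact ⟨hm, fun i hi => by rcases Nat.lt_succ_iff_lt_or_eq.mp (Nat.lt_succ_of_le hi) with _ | rfl
                                  · exact hall i (by omega)
                                  · exact h⟩
      · right
        refine ⟨b, by omega, hsep, fun i hi1 hi2 => ?_, hm⟩
        rcases Nat.lt_succ_iff_lt_or_eq.mp (Nat.lt_succ_of_le hi2) with _ | rfl
        · exact hint i hi1 (by omega)
        · exact h

lemma cuts_split (p : Nat → Bool) (b k : Nat) (hb : b < k) (hpb : p b = true)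
    (hhi : ∀ i, b < i → i < k → p i = false) :
    (List.range k).filter p = (List.range b).filter p ++ [b] := by
  have hk : k = (b+1) + (k - (b+1)) := by omega
  rw [hk, List.range_add, List.filter_append, List.range_succ, List.filter_append,
    List.filter_singleton, hpb]
  simp only [cond_true]
  have : (List.filter p (List.map (fun x => b + 1 + x) (List.range (k - (b + 1))))) = [] := by
    rw [List.filter_eq_nil_iff]
    intro a ha
    rcases List.mem_map.mp ha with ⟨x, hx, rfl⟩
    have := List.mem_range.mp hx
    simp [hhi _ (by omega : b < b+1+x) (by omega : b+1+x < k)]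
  rw [this, List.append_nil]

lemma cuts_enum (cs : List Char) (s : Nat) :
    ((PySem.List.enumerate cs (s : Int)).filter (fun p => p.2 == '\n' || p.2 == ';')).map (·.1)
      = (cutsN cs cs.length).map (fun i => ((s + i : Nat) : Int)) := by
  induction cs generalizing s with
  | nil => simp [PySem.List.enumerate_nil, cutsN]
  | cons x xs ih =>
    rw [PySem.List.enumerate_cons]
    have hrange : cutsN (x :: xs) (x :: xs).length
        = (if sepB x then [0] else []) ++ (cutsN xs xs.length).map (· + 1) := by
      have ht : List.filter ((fun i => sepB ((x :: xs).getD i ' ')) ∘ Nat.succ)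
            (List.range xs.length)
          = List.filter (fun i => sepB (xs.getD i ' ')) (List.range xs.length) :=
        List.filter_congr (fun a _ => by simp [Function.comp])
      rw [cutsN, List.length_cons, List.range_succ_eq_map, List.filter_cons, List.filter_map, ht,
        cutsN]
      simp only [List.getD_cons_zero]
      split <;> rfl
    rw [List.filter_cons]
    by_cases hx : sepB x
    · rw [if_pos (by simpa [sepB] using hx)]
      rw [List.map_cons, hrange, if_pos hx]
      have := ih (s+1)
      push_cast at this ⊢
      rw [this]
      simp only [List.map_append, List.map_map, List.map_cons, List.map_nil]
      congr 1
      apply List.map_congr_left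
      intro a _
      simp only [Function.comp_apply]
      omega
    · rw [if_neg (by simpa [sepB] using hx)]
      rw [hrange, if_neg hx]
      have := ih (s+1)
      push_cast at this ⊢
      rw [this]
      simp only [List.nil_append, List.map_map]
      apply List.map_congr_left
      intro a _
      simp only [Function.comp_apply]
      omega

lemma sepAt_iff (cs : List Char) (k i : Nat) (hi : i < k) (hk : k ≤ cs.length) :
    sepAt (cs.take k) i ↔ sepB (cs.getD i ' ') = true := by
  have hlen : i < cs.length := lt_of_lt_of_le hi hk
  rw [sepAt, List.getElem?_take_of_lt hi, List.getElem?_eq_getElem hlen]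
  simp [sepB, List.getD, List.getElem?_eq_getElem hlen]

lemma slice_prefix (cs : List Char) (k b : Nat) (hb : b ≤ k) :
    PySem.Str.slice (String.ofList (cs.take k)) none (some ((b : Nat) : Int))
      = String.ofList (cs.take b) := by
  apply str_ext
  rw [PySem.Str.toList_slice]
  simp only [String.toList_ofList, PySem.Chars.slice_eq_listSlice]
  rw [PySem.List.slice_to_natCast, List.take_take, min_eq_left hb]

lemma loop_eq (k : Nat) : ∀ (cs : List Char), k ≤ cs.length → ∀ (fuel : Nat), k < fuel →
    ∀ (acc : List String) (seen : PySem.Set String), (∀ t ∈ seen, k ≤ t.length) →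
    pyAloop fuel acc seen (String.ofList (cs.take k))
      = acc ++ (cutsN cs k).reverse.map (fun i => String.ofList (cs.take i)) := by
  induction k using Nat.strong_induction_on with
  | _ k ih =>
  intro cs hk fuel hfuel acc seen hseen
  obtain ⟨f, rfl⟩ : ∃ f, fuel = f + 1 := ⟨fuel - 1, by omega⟩
  by_cases hk0 : k = 0
  · subst hk0
    simp [pyAloop, cutsN]
  · have hne : ¬ (String.ofList (cs.take k) = "") := by
      intro h
      have : List.take k cs = [] := by simpa using congrArg String.toList h
      rw [List.take_eq_nil_iff] at this
      rcases this with h1 | h1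
      · exact hk0 h1
      · rw [h1] at hk; simp at hk; omega
    have hlen : (cs.take k).length = k := by
      rw [List.length_take, min_eq_left hk]
    have hrf : ∀ c : Char, PySem.Str.rfind (String.ofList (cs.take k)) (String.ofList [c])
        = PySem.Chars.rfind.go (cs.take k) [c] k := by
      intro c
      rw [PySem.Str.rfind_eq]
      simp only [String.toList_ofList]
      rw [show PySem.Chars.rfind (cs.take k) [c]
          = PySem.Chars.rfind.go (cs.take k) [c] (cs.take k).length from rfl, hlen]
    have hrf1 : PySem.Str.rfind (String.ofList (cs.take k)) "\n"
        = PySem.Chars.rfind.go (cs.take k) ['\n'] k := by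
      rw [show ("\n" : String) = String.ofList ['\n'] from rfl]; exact hrf '\n'
    have hrf2 : PySem.Str.rfind (String.ofList (cs.take k)) ";"
        = PySem.Chars.rfind.go (cs.take k) [';'] k := by
      rw [show (";" : String) = String.ofList [';'] from rfl]; exact hrf ';'
    rw [show pyAloop (f+1) acc seen (String.ofList (cs.take k)) =
      if String.ofList (cs.take k) = "" then acc
      else
        let boundary : Int := max (PySem.Str.rfind (String.ofList (cs.take k)) "\n")
          (PySem.Str.rfind (String.ofList (cs.take k)) ";")
        if boundary < 0 then acc
        else
          let current' := PySem.Str.slice (String.ofList (cs.take k)) none (some boundary)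
          if PySem.Set.contains seen current' then acc
          else pyAloop f (acc ++ [current']) (PySem.Set.add seen current') current' from rfl]
    rw [if_neg hne]
    simp only [hrf1, hrf2]
    rcases maxgo_cases (cs.take k) k with ⟨hm, hall⟩ | ⟨b, hb, hsep, hint, hm⟩
    · rw [hm, if_pos (by norm_num)]
      have hcut : cutsN cs k = [] := by
        rw [cutsN, List.filter_eq_nil_iff]
        intro i hi
        have hik := List.mem_range.mp hi
        simp only [Bool.not_eq_true]
        by_contra hc
        exact hall i (le_of_lt hik) ((sepAt_iff cs k i hik hk).mpr (by simpa using hc))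
      rw [hcut]; simp
    · have hblt : b < k := by
        rcases hsep with h | h <;>
          · have := (List.getElem?_eq_some_iff.mp h).1
            omega
      rw [hm, if_neg (by omega)]
      simp only [slice_prefix cs k b (le_of_lt hblt)]
      have hlenb : (String.ofList (cs.take b)).length = b := by
        simp [List.length_take]; omega
      have hnotin : PySem.Set.contains seen (String.ofList (cs.take b)) = false := by
        by_contra hc
        have hmem : String.ofList (cs.take b) ∈ seen := by
          have := Bool.not_eq_false _ |>.mp hc
          simpa [PySem.Set.contains] using this
        have := hseen _ hmem
        omega
      rw [hnotin, if_neg (by simp)]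
      have hrec := ih b hblt cs (by omega) f (by omega) (acc ++ [String.ofList (cs.take b)])
        (PySem.Set.add seen (String.ofList (cs.take b)))
        (by
          intro t ht
          rw [PySem.Set.mem_add] at ht
          rcases ht with ht | rfl
          · exact le_trans (le_of_lt hblt) (hseen t ht)
          · omega)
      rw [hrec]
      have hsplit : cutsN cs k = cutsN cs b ++ [b] := by
        rw [cutsN, cutsN]
        apply cuts_split _ b k hblt
        · exact (sepAt_iff cs k b hblt hk).mp hsep
        · intro i h1 h2
          by_contra hc
          exact hint i h1 (le_of_lt h2)
            ((sepAt_iff cs k i h2 hk).mpr (by simpa using hc))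
      rw [hsplit]
      simp [List.append_assoc]

lemma main_eq (s : String) :
    truncate_to_complete_program_py s = truncate_to_complete_program_py_alt s := by
  have hs : s = String.ofList (s.toList.take s.toList.length) := by
    rw [List.take_length, String.ofList_toList]
  have hlen : s.length = s.toList.length := by simp
  have hofl : PySem.Set.ofList [s] = [s] := rfl
  rw [truncate_to_complete_program_py, truncate_to_complete_program_py_alt]
  have hloop := loop_eq s.toList.length s.toList (le_refl _) (s.length + 1) (by omega)
    [s] (PySem.Set.ofList [s]) (by intro t ht; rw [hofl] at ht; simp at ht; subst ht; omega)
  rw [congrArg (pyAloop (s.length + 1) [s] (PySem.Set.ofList [s])) hs]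
  rw [hloop]
  have hcp : ((PySem.List.enumerate s.toList 0).filter
        (fun p => p.2 == '\n' || p.2 == ';')).map (·.1)
      = (cutsN s.toList s.toList.length).map (fun i => ((i : Nat) : Int)) := by
    have := cuts_enum s.toList 0
    push_cast at this ⊢
    simpa using this
  rw [hcp]
  simp only [List.map_reverse, List.map_map]
  have hmap : (cutsN s.toList s.toList.length).map
        ((fun i => PySem.Str.slice s none (some i)) ∘ (fun i : Nat => (i : Int)))
      = (cutsN s.toList s.toList.length).map (fun i => String.ofList (s.toList.take i)) := by
    apply List.map_congr_left
    intro a ha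
    have halt : a < s.toList.length := by
      have := List.mem_range.mp (List.mem_of_mem_filter ha)
      exact this
    simp only [Function.comp_apply]
    conv_lhs => rw [hs]
    exact slice_prefix s.toList s.toList.length a (le_of_lt halt)
  rw [hmap]
  simp

-- ===== VERDICT (by name: the statement is the Claim_ definition above) =====
theorem truncate_to_complete_program_py_spec : Claim_equal_truncate_to_complete_program_py := by
  unfold Claim_equal_truncate_to_complete_program_py Spec_truncate_to_complete_program_py
  intro source_prefix _
  exact main_eq source_prefix
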